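-- pv_equiv track=rewrite | github.com/RodrigoGarcia43/discrete-math-problems | 2- Weird Journey/src/solution_1.py | solve
-- ===== SOURCE A (Python) =====
-- def solve(n, m, edges):
--     visited = [0] * n
--     vertices = [[0] * n for _ in range(n)]
--
--     for v, u in edges:
--         v, u = v - 1, u - 1
--         if v == u:
--             vertices[v].append(u)
--
--         else:
--             vertices[v].append(u)
--             vertices[u].append(v)
--
--     # Verificando si el grafo es conexo, de no serlo se retorna 0.
--     dfs(visited, vertices, 0)
--     for v in visited:
--         if v == 0:
--             return 0
--
--     degrees = []
--     for v in vertices: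
--         degrees.append(len(v))
--
--     result = 0
--     # Por cada pareja de aristas del grafo se analizan los grados de los cuatro vértices participantes.
--     # Si se cumple con las condiciones del análisis, el valor a retornar aumenta en uno,
--     # pues se encuentra un camino válido.
--     for i in range(len(edges)):
--         for j in range(i + 1, len(edges)):
--             result += analyze_degrees(edges[i], edges[j])
--
--     return result
--
-- def analyze_degrees(edge1, edge2):
--     v1, v2, v3, v4 = edge1[0], edge1[1], edge2[0], edge2[1]
--     _set = set([v1, v2, v3, v4])
--     if len(_set) == 3 or len(_set) == 2:
--         return 1
--     else:
--         return 0
--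
-- def dfs(visited, graph, node):
--     if visited[node] == 0:
--         visited[node] = 1
--         for neighbour in graph[node]:
--             dfs(visited, graph, neighbour)
-- ===== SOURCE B (Python) =====
-- # B: same connected-from-vertex-1 check (recursive DFS on a clean adjacency list,
-- # no n-zero padding rows), but the quadratic pair loop is replaced by a single
-- # pass that counts, for each new edge, how many earlier edges pair with it using
-- # running counters (incidence, parallel-edge and self-loop counts).
-- def solve(n, m, edges):
--     adj = [[] for _ in range(n)]
--     for v, u in edges:
--         v, u = v - 1, u - 1
--         adj[v].append(u)
--         if v != u:
--             adj[u].append(v)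
--
--     seen = [0] * n
--     dfs(seen, adj, 0)
--     if 0 in seen:
--         return 0
--
--     inc = {}
--     para = {}
--     loops = {}
--     nonloop_cnt = 0
--     processed = 0
--     result = 0
--     for v, u in edges:
--         if v == u:
--             result += processed - loops.get(v, 0)
--             loops[v] = loops.get(v, 0) + 1
--         else:
--             key = (v, u) if v < u else (u, v)
--             result += (processed - nonloop_cnt)
--             result += inc.get(v, 0) + inc.get(u, 0) - para.get(key, 0)
--             inc[v] = inc.get(v, 0) + 1
--             inc[u] = inc.get(u, 0) + 1
--             para[key] = para.get(key, 0) + 1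
--             nonloop_cnt += 1
--         processed += 1
--     return result
--
-- def dfs(seen, adj, node):
--     if seen[node] == 0:
--         seen[node] = 1
--         for nb in adj[node]:
--             dfs(seen, adj, nb)
-- ===== Notes on version B (the rewrite author's own statement) =====
-- stated objective: faster
-- what changed: B keeps the recursive DFS connectivity check (on a clean adjacency list instead of rows pre-padded with n zeros) but replaces A's O(m^2) double loop over edge pairs by a single pass that, for each edge, counts its valid pairings with all earlier edges from running counters (per-vertex incidence, parallel-edge and self-loop counts) via inclusion-exclusion.
import Mathlib
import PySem

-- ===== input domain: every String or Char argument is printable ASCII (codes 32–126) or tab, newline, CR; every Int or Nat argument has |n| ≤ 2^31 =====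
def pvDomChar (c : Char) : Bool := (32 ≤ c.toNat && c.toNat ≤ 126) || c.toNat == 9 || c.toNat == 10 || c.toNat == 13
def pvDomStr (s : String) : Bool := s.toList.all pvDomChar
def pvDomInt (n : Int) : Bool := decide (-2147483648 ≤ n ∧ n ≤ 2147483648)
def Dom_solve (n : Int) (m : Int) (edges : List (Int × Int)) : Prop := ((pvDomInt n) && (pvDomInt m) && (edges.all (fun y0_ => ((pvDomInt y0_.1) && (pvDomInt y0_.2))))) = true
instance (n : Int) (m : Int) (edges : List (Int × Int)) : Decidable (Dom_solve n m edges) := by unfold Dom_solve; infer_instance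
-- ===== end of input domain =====

-- B replaces A's O(m^2) double loop over edge pairs by one counter-based pass
-- (per-vertex incidence / parallel-edge / self-loop counts via inclusion-exclusion);
-- the recursive DFS connectivity check stays, on a clean adjacency list without A's
-- zero padding.  (Timed by the check as measurably faster at the largest size.)


-- ===== PORT A =====

-- g[idx].append(x)  (Python list-of-lists mutation; idx may be negative = from the end;
-- out-of-range leaves g unchanged — Python raises there, excluded by Pre_solve)
def pvAppendAt (g : List (List Int)) (idx : Int) (x : Int) : List (List Int) :=
  PySem.List.pySetD g idx (PySem.List.pyGetD g idx [] ++ [x])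

-- body of A's edge loop
def pvAddEdgeA (g : List (List Int)) (e : Int × Int) : List (List Int) :=
  let v := e.1 - 1
  let u := e.2 - 1
  if v = u then pvAppendAt g v u
  else pvAppendAt (pvAppendAt g v u) u v

-- the recursive dfs helper (textually identical in Source A and Source B); the fuel argument
-- only makes the same recursion total: call depth is at most n+1, so fuel n+1 never runs out
def pvDfs (graph : List (List Int)) : Nat → List Int → Int → List Int
  | 0, vis, _ => vis
  | f+1, vis, node =>
    if PySem.List.pyGetD vis node 1 = 0 then
      (PySem.List.pyGetD graph node []).foldl (fun w nb => pvDfs graph f w nb)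
        (PySem.List.pySetD vis node 1)
    else vis

-- analyze_degrees
def analyzeDegrees (edge1 edge2 : Int × Int) : Int :=
  let s : PySem.Set Int := PySem.Set.ofList [edge1.1, edge1.2, edge2.1, edge2.2]
  if s.length = 3 ∨ s.length = 2 then 1 else 0

-- A's double loop over index pairs i < j
def pvCountA (es : List (Int × Int)) : Int :=
  (PySem.List.pyRange 0 (PySem.List.len es) 1).foldl (fun res i =>
    (PySem.List.pyRange (i + 1) (PySem.List.len es) 1).foldl (fun r j =>
      r + analyzeDegrees (PySem.List.pyGetD es i (0, 0)) (PySem.List.pyGetD es j (0, 0))) res) 0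

def solve (n : Int) (m : Int) (edges : List (Int × Int)) : Int :=
  let N := n.toNat
  let vertices := edges.foldl pvAddEdgeA (List.replicate N (List.replicate N (0 : Int)))
  let visited := pvDfs vertices (N + 1) (List.replicate N (0 : Int)) 0
  if visited.contains 0 then 0
  else
    let _degrees := vertices.map PySem.List.len   -- A computes `degrees` and never uses it
    pvCountA edges

-- ===== PORT B =====

-- body of B's edge loop (rows start empty, no zero padding)
def pvAddEdgeB (g : List (List Int)) (e : Int × Int) : List (List Int) :=
  let v := e.1 - 1
  let u := e.2 - 1
  let g2 := pvAppendAt g v u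
  if v ≠ u then pvAppendAt g2 u v else g2

-- body of B's counting loop; state = (inc, para, loops, nonloop_cnt, processed, result)
def pvStepB (st : PySem.Dict Int Int × PySem.Dict (Int × Int) Int × PySem.Dict Int Int × Int × Int × Int)
    (e : Int × Int) :
    PySem.Dict Int Int × PySem.Dict (Int × Int) Int × PySem.Dict Int Int × Int × Int × Int :=
  let (inc, para, loops, nonloopCnt, processed, result) := st
  if e.1 = e.2 then
    (inc, para, loops.insert e.1 (loops.getD e.1 0 + 1), nonloopCnt, processed + 1,
     result + (processed - loops.getD e.1 0))
  else
    let key := if e.1 < e.2 then (e.1, e.2) else (e.2, e.1)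
    let result := result + (processed - nonloopCnt)
        + (inc.getD e.1 0 + inc.getD e.2 0 - para.getD key 0)
    let inc := inc.insert e.1 (inc.getD e.1 0 + 1)
    let inc := inc.insert e.2 (inc.getD e.2 0 + 1)
    (inc, para.insert key (para.getD key 0 + 1), loops, nonloopCnt + 1, processed + 1, result)

def solve_alt (n : Int) (m : Int) (edges : List (Int × Int)) : Int :=
  let N := n.toNat
  let adj := edges.foldl pvAddEdgeB (List.replicate N ([] : List Int))
  let seen := pvDfs adj (N + 1) (List.replicate N (0 : Int)) 0
  if seen.contains 0 then 0
  else
    (edges.foldl pvStepB (PySem.Dict.empty, PySem.Dict.empty, PySem.Dict.empty, 0, 0, 0)).2.2.2.2.2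

-- ===== PRECONDITION & SPEC =====

-- Pre_ excludes exactly the inputs on which A raises IndexError: n ≤ 0 (visited[0]
-- in the dfs call) and edges with an endpoint whose 0-based index v-1 falls outside
-- the n rows (vertices[v-1]).
def Pre_solve (n : Int) (m : Int) (edges : List (Int × Int)) : Prop :=
  1 ≤ n ∧ ∀ e ∈ edges, 1 - n ≤ e.1 ∧ e.1 ≤ n ∧ 1 - n ≤ e.2 ∧ e.2 ≤ n
instance (n : Int) (m : Int) (edges : List (Int × Int)) : Decidable (Pre_solve n m edges) := by
  unfold Pre_solve; infer_instance

def pvWitness_solve : Int × Int × (List (Int × Int)) := (2, 2, [(1, 2), (2, 2)])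

def Spec_solve (n : Int) (m : Int) (edges : List (Int × Int)) (out : Int) : Prop := out = solve_alt n m edges
instance (n : Int) (m : Int) (edges : List (Int × Int)) (out : Int) : Decidable (Spec_solve n m edges out) := by unfold Spec_solve; infer_instance

-- ===== CLAIM (what is proved, stated in full; the proofs are below) =====
def Claim_equal_solve : Prop := ∀ (n : Int) (m : Int) (edges : List (Int × Int)), Dom_solve n m edges → Pre_solve n m edges → Spec_solve n m edges (solve n m edges)

-- ===== LEMMAS AND PROOFS =====

-- invariant tying A's padded adjacency rows to B's clean rows
def pvGRel (N : Nat) (gA gB : List (List Int)) : Prop :=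
  gA.length = N ∧ gB.length = N ∧
  ∀ i : Nat, i < N → gA.getD i [] = List.replicate N (0 : Int) ++ gB.getD i []

def pvNorm (e : Int × Int) : Int × Int := if e.1 < e.2 then e else (e.2, e.1)
def pvCntNL (p : List (Int × Int)) : Int := (p.countP (fun x => decide (x.1 ≠ x.2)) : Int)
def pvCntI (p : List (Int × Int)) (v : Int) : Int :=
  (p.countP (fun x => decide (x.1 ≠ x.2 ∧ (x.1 = v ∨ x.2 = v))) : Int)
def pvCntK (p : List (Int × Int)) (k : Int × Int) : Int :=
  (p.countP (fun x => decide (x.1 ≠ x.2 ∧ pvNorm x = k)) : Int)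
def pvCntL (p : List (Int × Int)) (v : Int) : Int :=
  (p.countP (fun x => decide (x.1 = v ∧ x.2 = v)) : Int)

lemma analyze_loop (c d a : Int) : analyzeDegrees (c, d) (a, a) = if c = a ∧ d = a then 0 else 1 := by
  by_cases h1 : c = d <;> by_cases h2 : c = a <;> by_cases h3 : d = a <;>
    simp_all [analyzeDegrees, PySem.Set.ofList, PySem.Set.add, PySem.Set.contains, PySem.Set.empty, eq_comm]
lemma analyze_nonloop (c d a b : Int) (h : a ≠ b) :
    analyzeDegrees (c, d) (a, b) =
      if c = d then 1 else if c = a ∨ c = b ∨ d = a ∨ d = b then 1 else 0 := by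
  by_cases h1 : c = d <;> by_cases h2 : c = a <;> by_cases h3 : c = b <;>
    by_cases h4 : d = a <;> by_cases h5 : d = b <;>
    simp_all [analyzeDegrees, PySem.Set.ofList, PySem.Set.add, PySem.Set.contains, PySem.Set.empty, eq_comm]


lemma sum_loop (p : List (Int × Int)) (a : Int) :
    (p.map (fun x => analyzeDegrees x (a, a))).sum = p.length - pvCntL p a := by
  induction p with
  | nil => simp [pvCntL]
  | cons x p ih =>
    obtain ⟨x1, x2⟩ := x
    have hx : analyzeDegrees (x1, x2) (a, a) = if x1 = a ∧ x2 = a then 0 else 1 :=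
      analyze_loop x1 x2 a
    simp only [List.map_cons, List.sum_cons, ih, pvCntL, List.countP_cons, List.length_cons, hx]
    by_cases h2 : x1 = a <;> by_cases h3 : x2 = a <;> simp_all <;> omega

lemma sum_nonloop (p : List (Int × Int)) (a b : Int) (hab : a ≠ b) :
    (p.map (fun x => analyzeDegrees x (a, b))).sum =
      (p.length - pvCntNL p) + (pvCntI p a + pvCntI p b - pvCntK p (pvNorm (a, b))) := by
  induction p with
  | nil => simp [pvCntNL, pvCntI, pvCntK]
  | cons x p ih =>
    obtain ⟨x1, x2⟩ := x
    have hx := analyze_nonloop x1 x2 a b hab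
    have hk : (pvNorm (x1, x2) = pvNorm (a, b)) ↔ ((x1 = a ∧ x2 = b) ∨ (x1 = b ∧ x2 = a)) := by
      simp only [pvNorm, Prod.ext_iff]
      split_ifs <;> simp <;> omega
    simp only [List.map_cons, List.sum_cons, List.length_cons,
      pvCntNL, pvCntI, pvCntK, List.countP_cons, hx, hk, ih]
    by_cases h1 : x1 = x2
    · simp_all; omega
    · by_cases h2 : x1 = a <;> by_cases h3 : x1 = b <;> by_cases h4 : x2 = a <;>
        by_cases h5 : x2 = b <;> simp_all <;> omega

def pvT : List (Int × Int) → Int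
  | [] => 0
  | x :: xs => ((xs.map (analyzeDegrees x)).sum) + pvT xs

lemma pvT_append (p : List (Int × Int)) (e : Int × Int) :
    pvT (p ++ [e]) = pvT p + (p.map (fun x => analyzeDegrees x e)).sum := by
  induction p with
  | nil => simp [pvT]
  | cons x p ih => simp [pvT, ih]; ring

def pvStB (p : List (Int × Int)) :
    PySem.Dict Int Int × PySem.Dict (Int × Int) Int × PySem.Dict Int Int × Int × Int × Int :=
  p.foldl pvStepB (PySem.Dict.empty, PySem.Dict.empty, PySem.Dict.empty, 0, 0, 0)


lemma pvStB_append (p : List (Int × Int)) (e : Int × Int) :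
    pvStB (p ++ [e]) = pvStepB (pvStB p) e := by
  simp [pvStB, List.foldl_append]

lemma pvStB_char (p : List (Int × Int)) :
    (∀ v, (pvStB p).1.getD v 0 = pvCntI p v) ∧
    (∀ k, (pvStB p).2.1.getD k 0 = pvCntK p k) ∧
    (∀ v, (pvStB p).2.2.1.getD v 0 = pvCntL p v) ∧
    (pvStB p).2.2.2.1 = pvCntNL p ∧
    (pvStB p).2.2.2.2.1 = p.length ∧
    (pvStB p).2.2.2.2.2 = pvT p := by
  induction p using List.reverseRecOn with
  | nil =>
    simp [pvStB, pvT, pvCntI, pvCntK, pvCntL, pvCntNL, PySem.Dict.getD_empty]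
  | append_singleton p e ih =>
    obtain ⟨hinc, hpara, hloops, hnl, hproc, hres⟩ := ih
    obtain ⟨a, b⟩ := e
    by_cases hab : a = b
    · subst hab
      have hstep : pvStB (p ++ [(a, a)]) =
          ((pvStB p).1, (pvStB p).2.1,
           (pvStB p).2.2.1.insert a ((pvStB p).2.2.1.getD a 0 + 1),
           (pvStB p).2.2.2.1, (pvStB p).2.2.2.2.1 + 1,
           (pvStB p).2.2.2.2.2 + ((pvStB p).2.2.2.2.1 - (pvStB p).2.2.1.getD a 0)) := by
        rw [pvStB_append]
        simp [pvStepB]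
      rw [hstep]
      refine ⟨?_, ?_, ?_, ?_, ?_, ?_⟩
      · intro v
        simpa [pvCntI, List.countP_append] using hinc v
      · intro k
        simpa [pvCntK, List.countP_append] using hpara k
      · intro v
        rw [show (((pvStB p).1, (pvStB p).2.1,
            (pvStB p).2.2.1.insert a ((pvStB p).2.2.1.getD a 0 + 1),
            (pvStB p).2.2.2.1, (pvStB p).2.2.2.2.1 + 1,
            (pvStB p).2.2.2.2.2 + ((pvStB p).2.2.2.2.1 - (pvStB p).2.2.1.getD a 0))).2.2.1
          = (pvStB p).2.2.1.insert a ((pvStB p).2.2.1.getD a 0 + 1) from rfl]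
        rw [PySem.Dict.getD_insert]
        simp only [pvCntL, List.countP_append, List.countP_cons, List.countP_nil]
        split_ifs with h2 <;> simp_all [hloops v, pvCntL]
      · simpa [pvCntNL, List.countP_append] using hnl
      · simp [hproc]
      · show (pvStB p).2.2.2.2.2 + ((pvStB p).2.2.2.2.1 - (pvStB p).2.2.1.getD a 0) = pvT (p ++ [(a, a)])
        rw [pvT_append, sum_loop p a, hres, hproc, hloops a]
        try ring
    · have hstep : pvStB (p ++ [(a, b)]) =
          (((pvStB p).1.insert a ((pvStB p).1.getD a 0 + 1)).insert b
             (((pvStB p).1.insert a ((pvStB p).1.getD a 0 + 1)).getD b 0 + 1),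
           (pvStB p).2.1.insert (pvNorm (a, b)) ((pvStB p).2.1.getD (pvNorm (a, b)) 0 + 1),
           (pvStB p).2.2.1,
           (pvStB p).2.2.2.1 + 1, (pvStB p).2.2.2.2.1 + 1,
           (pvStB p).2.2.2.2.2 + ((pvStB p).2.2.2.2.1 - (pvStB p).2.2.2.1)
             + ((pvStB p).1.getD a 0 + (pvStB p).1.getD b 0
                - (pvStB p).2.1.getD (pvNorm (a, b)) 0)) := by
        rw [pvStB_append]
        simp only [pvStepB, pvNorm]
        rw [if_neg hab]
      rw [hstep]
      refine ⟨?_, ?_, ?_, ?_, ?_, ?_⟩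
      · intro v
        show (((pvStB p).1.insert a ((pvStB p).1.getD a 0 + 1)).insert b
             (((pvStB p).1.insert a ((pvStB p).1.getD a 0 + 1)).getD b 0 + 1)).getD v 0
           = pvCntI (p ++ [(a, b)]) v
        simp only [PySem.Dict.getD_insert, hinc]
        simp only [pvCntI, List.countP_append, List.countP_cons, List.countP_nil]
        split_ifs with h2 h3 <;> simp_all <;> omega
      · intro k
        show ((pvStB p).2.1.insert (pvNorm (a, b)) ((pvStB p).2.1.getD (pvNorm (a, b)) 0 + 1)).getD k 0
           = pvCntK (p ++ [(a, b)]) k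
        simp only [PySem.Dict.getD_insert, hpara]
        simp only [pvCntK, List.countP_append, List.countP_cons, List.countP_nil]
        split_ifs with h2 <;> simp_all
      · intro v
        show (pvStB p).2.2.1.getD v 0 = pvCntL (p ++ [(a, b)]) v
        rw [hloops v]
        simp only [pvCntL, List.countP_append, List.countP_cons, List.countP_nil]
        have : ¬(a = v ∧ b = v) := by rintro ⟨rfl, rfl⟩; exact hab rfl
        simp_all
      · show (pvStB p).2.2.2.1 + 1 = pvCntNL (p ++ [(a, b)])
        rw [hnl]
        simp [pvCntNL, List.countP_append, hab]
      · show (pvStB p).2.2.2.2.1 + 1 = ((p ++ [(a, b)]).length : Int)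
        rw [hproc]; simp
      · show (pvStB p).2.2.2.2.2 + ((pvStB p).2.2.2.2.1 - (pvStB p).2.2.2.1)
             + ((pvStB p).1.getD a 0 + (pvStB p).1.getD b 0
                - (pvStB p).2.1.getD (pvNorm (a, b)) 0) = pvT (p ++ [(a, b)])
        rw [pvT_append, sum_nonloop p a b hab, hres, hproc, hnl, hinc a, hinc b, hpara]
        ring

lemma pvCountA_sum (es : List (Int × Int)) :
    pvCountA es = ((PySem.List.pyRange 0 (PySem.List.len es) 1).map (fun i =>
      ((PySem.List.pyRange (i + 1) (PySem.List.len es) 1).map (fun j =>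
        analyzeDegrees (PySem.List.pyGetD es i (0, 0)) (PySem.List.pyGetD es j (0, 0)))).sum)).sum := by
  unfold pvCountA
  rw [PySem.List.foldl_congr_mem (g := fun res i =>
    res + ((PySem.List.pyRange (i + 1) (PySem.List.len es) 1).map (fun j =>
      analyzeDegrees (PySem.List.pyGetD es i (0, 0)) (PySem.List.pyGetD es j (0, 0)))).sum)]
  · rw [PySem.List.foldl_add]; simp
  · intro acc i _
    rw [PySem.List.foldl_add]

lemma pvCountA_eq_pvT (es : List (Int × Int)) : pvCountA es = pvT es := by
  induction es using List.reverseRecOn with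
  | nil => simp [pvCountA, pvT, PySem.List.len, PySem.List.pyRange]
  | append_singleton p e ih =>
    rw [pvCountA_sum, pvT_append, ← ih, pvCountA_sum]
    have hlen : PySem.List.len (p ++ [e]) = (p.length : Int) + 1 := by
      simp [PySem.List.len_eq]
    have hlenp : PySem.List.len p = (p.length : Int) := by simp [PySem.List.len_eq]
    rw [hlen, hlenp]
    rw [PySem.List.pyRange_one_succ_right (by positivity)]
    rw [List.map_append, List.sum_append]
    have hlast : ((PySem.List.pyRange ((p.length : Int) + 1) ((p.length : Int) + 1) 1).map (fun j =>
        analyzeDegrees (PySem.List.pyGetD (p ++ [e]) (p.length : Int) (0, 0))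
          (PySem.List.pyGetD (p ++ [e]) j (0, 0)))).sum = 0 := by
      rw [PySem.List.pyRange_one_eq_nil le_rfl]; simp
    have hgetlast : PySem.List.pyGetD (p ++ [e]) (p.length : Int) (0, 0) = e := by
      simp [PySem.List.pyGetD]
    have hget : ∀ j : Int, 0 ≤ j → j < (p.length : Int) →
        PySem.List.pyGetD (p ++ [e]) j (0, 0) = PySem.List.pyGetD p j (0, 0) := by
      intro j h0 hj
      obtain ⟨jn, rfl⟩ := Int.eq_ofNat_of_zero_le h0
      rw [PySem.List.pyGetD_natCast, PySem.List.pyGetD_natCast]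
      have hjn : jn < p.length := by exact_mod_cast hj
      rw [List.getD, List.getD, List.getElem?_append_left hjn]
    simp only [List.map_cons, List.map_nil, List.sum_cons, List.sum_nil, add_zero]
    rw [hlast, add_zero]
    rw [List.map_congr_left (g := fun i : Int =>
        ((PySem.List.pyRange (i + 1) (p.length : Int) 1).map (fun j =>
          analyzeDegrees (PySem.List.pyGetD p i (0, 0)) (PySem.List.pyGetD p j (0, 0)))).sum
        + analyzeDegrees (PySem.List.pyGetD p i (0, 0)) e) ?_]
    · rw [PySem.List.sum_map_add_int]
      congr 1
      rw [show (fun i : Int => analyzeDegrees (PySem.List.pyGetD p i (0, 0)) e)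
          = (fun x : Int × Int => analyzeDegrees x e) ∘ (fun i : Int => PySem.List.pyGetD p i (0, 0)) from rfl]
      rw [← List.map_map, PySem.List.map_pyGetD_pyRange_zero']
    · intro i hi
      rw [PySem.List.mem_pyRange_one] at hi
      obtain ⟨h0i, him⟩ := hi
      rw [PySem.List.pyRange_one_succ_right (by omega), List.map_append, List.sum_append]
      rw [hget i h0i him]
      rw [List.map_congr_left (g := fun j =>
        analyzeDegrees (PySem.List.pyGetD p i (0, 0)) (PySem.List.pyGetD p j (0, 0))) ?_]
      · simp [hgetlast]
      · intro j hj
        rw [PySem.List.mem_pyRange_one] at hj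
        rw [hget j (by omega) (by omega)]

lemma pyIdx?_some_lt {N : Nat} {i : Int} {k : Nat} (h : PySem.List.pyIdx? N i = some k) : k < N := by
  unfold PySem.List.pyIdx? at h
  split_ifs at h <;> simp_all <;> omega

lemma pvAppendAt_none {g : List (List Int)} {i : Int} {x : Int}
    (h : PySem.List.pyIdx? g.length i = none) : pvAppendAt g i x = g := by
  simp [pvAppendAt, PySem.List.pySetD, PySem.List.pySet?, h]

lemma pvAppendAt_some {g : List (List Int)} {i : Int} {x : Int} {k : Nat}
    (h : PySem.List.pyIdx? g.length i = some k) :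
    pvAppendAt g i x = g.set k (g.getD k [] ++ [x]) := by
  have hk : k < g.length := pyIdx?_some_lt h
  simp [pvAppendAt, PySem.List.pySetD, PySem.List.pySet?, PySem.List.pyGetD, PySem.List.pyGet?, h,
    List.getElem?_eq_getElem hk, List.getD]

lemma pvGetD_set_self {α : Type} {l : List α} {k : Nat} (hk : k < l.length) (v d : α) :
    (l.set k v).getD k d = v := by
  simp [List.getD, hk]

lemma pvGetD_set_ne {α : Type} {l : List α} {k j : Nat} (h : k ≠ j) (v : α) (d : α) :
    (l.set k v).getD j d = l.getD j d := by
  simp [List.getD, h]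

lemma grel_appendAt {N : Nat} {gA gB : List (List Int)} (i x : Int) (h : pvGRel N gA gB) :
    pvGRel N (pvAppendAt gA i x) (pvAppendAt gB i x) := by
  obtain ⟨hA, hB, hrow⟩ := h
  cases hidx : PySem.List.pyIdx? N i with
  | none =>
    rw [pvAppendAt_none (by rw [hA]; exact hidx), pvAppendAt_none (by rw [hB]; exact hidx)]
    exact ⟨hA, hB, hrow⟩
  | some k =>
    have hk : k < N := pyIdx?_some_lt hidx
    rw [pvAppendAt_some (by rw [hA]; exact hidx), pvAppendAt_some (by rw [hB]; exact hidx)]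
    refine ⟨by simp [hA], by simp [hB], ?_⟩
    intro j hj
    have hrk := hrow k hk
    have hrj := hrow j hj
    by_cases hkj : k = j
    · subst hkj
      rw [pvGetD_set_self (by omega), pvGetD_set_self (by omega)]
      rw [hrk, List.append_assoc]
    · rw [pvGetD_set_ne hkj, pvGetD_set_ne hkj]
      exact hrj

lemma grel_addEdge {N : Nat} {gA gB : List (List Int)} (e : Int × Int) (h : pvGRel N gA gB) :
    pvGRel N (pvAddEdgeA gA e) (pvAddEdgeB gB e) := by
  unfold pvAddEdgeA pvAddEdgeB
  by_cases hvu : e.1 - 1 = e.2 - 1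
  · rw [if_pos hvu, if_neg (not_not_intro hvu)]
    exact grel_appendAt _ _ h
  · rw [if_neg hvu, if_pos hvu]
    exact grel_appendAt _ _ (grel_appendAt _ _ h)

lemma grel_foldl {N : Nat} (edges : List (Int × Int)) :
    ∀ {gA gB : List (List Int)}, pvGRel N gA gB →
      pvGRel N (edges.foldl pvAddEdgeA gA) (edges.foldl pvAddEdgeB gB) := by
  induction edges with
  | nil => intro gA gB h; exact h
  | cons e es ih => intro gA gB h; exact ih (grel_addEdge e h)

lemma grel_init (N : Nat) :
    pvGRel N (List.replicate N (List.replicate N (0 : Int))) (List.replicate N ([] : List Int)) := by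
  refine ⟨by simp, by simp, ?_⟩
  intro j hj
  rw [List.getD, List.getD]
  simp [hj]

lemma pySetD_cases (xs : List Int) (i : Int) (v : Int) :
    PySem.List.pySetD xs i v = xs ∨
      ∃ k, k < xs.length ∧ PySem.List.pySetD xs i v = xs.set k v := by
  cases h : PySem.List.pyIdx? xs.length i with
  | none => left; simp [PySem.List.pySetD, PySem.List.pySet?, h]
  | some k =>
    right
    exact ⟨k, pyIdx?_some_lt h, by simp [PySem.List.pySetD, PySem.List.pySet?, h]⟩

lemma pySetD_one_keep {vis : List Int} {i : Int} (h : vis.getD 0 0 = 1) :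
    (PySem.List.pySetD vis i 1).getD 0 0 = 1 := by
  rcases pySetD_cases vis i 1 with hc | ⟨k, hk, hc⟩
  · rw [hc]; exact h
  · rw [hc]
    by_cases hk0 : k = 0
    · subst hk0; rw [pvGetD_set_self hk]
    · rw [pvGetD_set_ne hk0]; exact h

lemma pvDfs_length (g : List (List Int)) :
    ∀ (f : Nat) (vis : List Int) (node : Int), (pvDfs g f vis node).length = vis.length := by
  intro f
  induction f with
  | zero => intro vis node; rfl
  | succ f ih =>
    intro vis node
    simp only [pvDfs]
    split
    · have haux : ∀ (row : List Int) (w : List Int),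
          (row.foldl (fun w nb => pvDfs g f w nb) w).length = w.length := by
        intro row
        induction row with
        | nil => intro w; rfl
        | cons nb row ihr => intro w; rw [List.foldl_cons, ihr, ih]
      rw [haux, PySem.List.length_pySetD]
    · rfl

lemma pvDfs_one_keep (g : List (List Int)) :
    ∀ (f : Nat) (vis : List Int) (node : Int), vis.getD 0 0 = 1 →
      (pvDfs g f vis node).getD 0 0 = 1 := by
  intro f
  induction f with
  | zero => intro vis node h; exact h
  | succ f ih =>
    intro vis node h
    simp only [pvDfs]
    split
    · have haux : ∀ (row : List Int) (w : List Int), w.getD 0 0 = 1 →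
          (row.foldl (fun w nb => pvDfs g f w nb) w).getD 0 0 = 1 := by
        intro row
        induction row with
        | nil => intro w hw; exact hw
        | cons nb row ihr => intro w hw; rw [List.foldl_cons]; exact ihr _ (ih _ _ hw)
      exact haux _ _ (pySetD_one_keep h)
    · exact h

lemma pvDfs_noop (g : List (List Int)) (f : Nat) (vis : List Int) (h : vis.getD 0 0 = 1) :
    pvDfs g f vis 0 = vis := by
  cases f with
  | zero => rfl
  | succ f =>
    have hlen : 0 < vis.length := by
      by_contra hl
      have : vis = [] := List.eq_nil_of_length_eq_zero (by omega)
      subst this; simp [List.getD] at h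
    have hv : PySem.List.pyGetD vis 0 1 = 1 := by
      rw [PySem.List.pyGetD_zero]
      rw [List.getD_eq_getElem?_getD] at h ⊢
      cases hx : vis[0]? with
      | none => rw [hx] at h; simp at h
      | some a => rw [hx] at h; simp_all
    simp only [pvDfs, hv]
    simp

lemma pvDfs_graph_eq {N : Nat} {gA gB : List (List Int)} (hrel : pvGRel N gA gB) :
    ∀ (f : Nat) (vis : List Int) (node : Int), vis.length = N → vis.getD 0 0 = 1 →
      pvDfs gA f vis node = pvDfs gB f vis node := by
  obtain ⟨hA, hB, hrow⟩ := hrel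
  intro f
  induction f with
  | zero => intro vis node _ _; rfl
  | succ f ih =>
    intro vis node hlen h1
    simp only [pvDfs]
    split
    · -- rows
      have hset1 : (PySem.List.pySetD vis node 1).getD 0 0 = 1 := pySetD_one_keep h1
      have hsetlen : (PySem.List.pySetD vis node 1).length = N := by
        rw [PySem.List.length_pySetD]; exact hlen
      have hfoldA : ∀ (row : List Int) (w : List Int), w.length = N → w.getD 0 0 = 1 →
          row.foldl (fun w nb => pvDfs gA f w nb) w = row.foldl (fun w nb => pvDfs gB f w nb) w := by
        intro row
        induction row with
        | nil => intro w _ _; rfl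
        | cons nb row ihr =>
          intro w hw h1w
          rw [List.foldl_cons, List.foldl_cons, ← ih _ _ hw h1w]
          exact ihr _ (by rw [pvDfs_length]; exact hw) (pvDfs_one_keep _ _ _ _ h1w)
      have hzeros : ∀ (k : Nat) (w : List Int), w.getD 0 0 = 1 →
          (List.replicate k (0 : Int)).foldl (fun w nb => pvDfs gA f w nb) w = w := by
        intro k
        induction k with
        | zero => intro w _; rfl
        | succ k ihk =>
          intro w hw
          rw [List.replicate_succ, List.foldl_cons, pvDfs_noop _ _ _ hw]
          exact ihk _ hw
      -- compare row fetches
      cases hidx : PySem.List.pyIdx? N node with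
      | none =>
        have hrowA : PySem.List.pyGetD gA node [] = [] := by
          simp [PySem.List.pyGetD, PySem.List.pyGet?, hA, hidx]
        have hrowB : PySem.List.pyGetD gB node [] = [] := by
          simp [PySem.List.pyGetD, PySem.List.pyGet?, hB, hidx]
        rw [hrowA, hrowB]
        rfl
      | some k =>
        have hk : k < N := pyIdx?_some_lt hidx
        have hrowA : PySem.List.pyGetD gA node [] = gA.getD k [] := by
          simp [PySem.List.pyGetD, PySem.List.pyGet?, hA, hidx, List.getD]
        have hrowB : PySem.List.pyGetD gB node [] = gB.getD k [] := by
          simp [PySem.List.pyGetD, PySem.List.pyGet?, hB, hidx, List.getD]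
        rw [hrowA, hrowB, hrow k hk, List.foldl_append, hzeros _ _ hset1]
        exact hfoldA _ _ hsetlen hset1
    · rfl

lemma pvDfs_zeros_fold (gA : List (List Int)) (f : Nat) :
    ∀ (k : Nat) (w : List Int), w.getD 0 0 = 1 →
      (List.replicate k (0 : Int)).foldl (fun w nb => pvDfs gA f w nb) w = w := by
  intro k
  induction k with
  | zero => intro w _; rfl
  | succ k ihk =>
    intro w hw
    rw [List.replicate_succ, List.foldl_cons, pvDfs_noop _ _ _ hw]
    exact ihk _ hw

lemma pvDfs_fold_eq {N : Nat} {gA gB : List (List Int)} (hrel : pvGRel N gA gB) (f : Nat) :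
    ∀ (row : List Int) (w : List Int), w.length = N → w.getD 0 0 = 1 →
      row.foldl (fun w nb => pvDfs gA f w nb) w = row.foldl (fun w nb => pvDfs gB f w nb) w := by
  intro row
  induction row with
  | nil => intro w _ _; rfl
  | cons nb row ihr =>
    intro w hw h1w
    rw [List.foldl_cons, List.foldl_cons, ← pvDfs_graph_eq hrel f w nb hw h1w]
    exact ihr _ (by rw [pvDfs_length]; exact hw) (pvDfs_one_keep _ _ _ _ h1w)

lemma pvVisited_eq {N : Nat} {gA gB : List (List Int)} (hN : 0 < N) (hrel : pvGRel N gA gB) :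
    pvDfs gA (N + 1) (List.replicate N (0 : Int)) 0 = pvDfs gB (N + 1) (List.replicate N (0 : Int)) 0 := by
  obtain ⟨hA, hB, hrow⟩ := hrel
  simp only [pvDfs]
  have hv : PySem.List.pyGetD (List.replicate N (0 : Int)) 0 1 = 0 := by
    rw [PySem.List.pyGetD_zero, List.getD_eq_getElem?_getD]
    simp [hN]
  rw [hv, if_pos rfl]
  have hset : PySem.List.pySetD (List.replicate N (0 : Int)) 0 1
      = (List.replicate N (0 : Int)).set 0 1 := by
    rw [PySem.List.pySetD_of_nonneg _ _ le_rfl]; rfl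
  have h1 : (PySem.List.pySetD (List.replicate N (0 : Int)) 0 1).getD 0 0 = 1 := by
    rw [hset]; exact pvGetD_set_self (by simpa using hN) _ _
  have hlen' : (PySem.List.pySetD (List.replicate N (0 : Int)) 0 1).length = N := by
    rw [PySem.List.length_pySetD]; simp
  have hidx0 : PySem.List.pyIdx? N 0 = some 0 := by
    simp [PySem.List.pyIdx?, hN]
  have hrowA : PySem.List.pyGetD gA 0 [] = gA.getD 0 [] := by
    simp [PySem.List.pyGetD, PySem.List.pyGet?, hA, hidx0, List.getD]
  have hrowB : PySem.List.pyGetD gB 0 [] = gB.getD 0 [] := by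
    simp [PySem.List.pyGetD, PySem.List.pyGet?, hB, hidx0, List.getD]
  rw [hrowA, hrowB, hrow 0 hN, List.foldl_append, pvDfs_zeros_fold _ _ _ _ h1]
  exact pvDfs_fold_eq ⟨hA, hB, hrow⟩ N _ _ hlen' h1

-- ===== VERDICT (by name: the statement is the Claim_ definition above) =====
theorem solve_spec : Claim_equal_solve := by
  intro n m edges _hdom hpre
  unfold Spec_solve
  have hN : 0 < n.toNat := by
    have := hpre.1; omega
  have hrel := grel_foldl (N := n.toNat) edges (grel_init n.toNat)
  have hvis := pvVisited_eq hN hrel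
  simp only [solve, solve_alt]
  rw [hvis]
  split
  · rfl
  · rw [pvCountA_eq_pvT]
    exact ((pvStB_char edges).2.2.2.2.2).symm
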